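-- pv_equiv track=rewrite | github.com/ChrisChan8551/DNSA | hackerrank/countMeetings.py | countMeetings
-- ===== SOURCE A (Python) =====
-- def countMeetings(firstDay, lastDay):
--     # create a list of tuples looping through firstDay, lastDay
--     schedule = list(zip(firstDay, lastDay))
--     # sort the list by the lastDay, or index 1 of the tuple
--
--     #! instead of zip, you can use an array.
--     # schedule = []
--     # for i in range(len(firstDay)):
--     #     schedule.append(firstDay[i], lastDay[i])
--
--     schedule.sort(key=lambda x: x[1])
--     # initialize count variable
--     count = 0
--     # initialize a set to keep track of availability throughout the days.
--     # if it's available then add to set.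
--     # else break
--     available = set()
--     #loop through the start,end
--     for start, end in schedule:
--         #then you loop through the start and end days to determine if the 'day' is in the available set
--         for day in range(start, end + 1):
--             if day not in available:
--                 available.add(day)
--                 count += 1
--                 break
--     return count
-- ===== SOURCE B (Python) =====
-- def countMeetings(firstDay, lastDay):
--     # Union-find "next free day": nxt[d] points past a block of known-taken days,
--     # so the earliest free day >= start is found by pointer chasing (with path
--     # compression) instead of scanning the interval day by day.
--     nxt = {}
--     count = 0
--     for start, end in sorted(zip(firstDay, lastDay), key=lambda x: x[1]):
--         day = start
--         path = []
--         while day in nxt: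
--             path.append(day)
--             day = nxt[day]
--         for p in path:  # path compression
--             nxt[p] = day
--         if day <= end:
--             nxt[day] = day + 1
--             count += 1
--     return count
-- ===== Notes on version B (the rewrite author's own statement) =====
-- stated objective: alternative
-- what changed: The day-by-day scan of each interval for the earliest unused day is replaced by a union-find 'next free day' pointer dictionary with path compression, which follows pointers over blocks of already-taken days instead of testing each day's set membership.
import Mathlib
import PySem

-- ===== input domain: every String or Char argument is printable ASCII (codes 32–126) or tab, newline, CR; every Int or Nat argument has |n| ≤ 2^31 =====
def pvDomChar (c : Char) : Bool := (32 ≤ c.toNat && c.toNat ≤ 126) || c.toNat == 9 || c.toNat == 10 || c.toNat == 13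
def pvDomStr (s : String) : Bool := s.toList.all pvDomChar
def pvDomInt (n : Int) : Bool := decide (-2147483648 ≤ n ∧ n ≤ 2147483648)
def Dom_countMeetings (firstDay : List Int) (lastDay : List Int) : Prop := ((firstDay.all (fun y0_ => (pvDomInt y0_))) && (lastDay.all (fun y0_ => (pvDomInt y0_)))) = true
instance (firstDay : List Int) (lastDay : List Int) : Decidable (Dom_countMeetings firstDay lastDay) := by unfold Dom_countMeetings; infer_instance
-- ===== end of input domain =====

-- A = greedy by end, scanning each interval day by day; B = the same greedy with a
-- union-find "next free day" pointer structure (path compression), a different algorithm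
-- for locating the earliest unused day. Return values proved equal on all inputs.


-- ===== PORT A =====
-- inner 'for day in range(start, end+1): if day not in available: add; count += 1; break'
-- ported as a day-counter recursion (range is lazy in Python; steps = len(range(start, end+1)))
def innerA (d : Int) : Nat → PySem.Set Int → Int → (PySem.Set Int × Int)
  | 0, av, c => (av, c)
  | steps + 1, av, c =>
      if d ∈ av then innerA (d + 1) steps av c
      else (PySem.Set.add av d, c + 1)

def countMeetings (firstDay : List Int) (lastDay : List Int) : Int :=
  let schedule := PySem.List.sorted (firstDay.zip lastDay) (fun x => x.2) false
  (schedule.foldl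
    (fun st p => innerA p.1 (p.2 + 1 - p.1).toNat st.1 st.2)
    (PySem.Set.empty, 0)).2

-- ===== PORT B =====
-- 'day = start; path = []; while day in nxt: path.append(day); day = nxt[day]'
-- fuel = nxt.size + 1 bounds the loop: the chain visits pairwise distinct keys.
def chaseB (nxt : PySem.Dict Int Int) : Nat → Int → Int × List Int
  | 0, d => (d, [])
  | fuel + 1, d =>
      match nxt.get? d with
      | none => (d, [])
      | some n => let (r, p) := chaseB nxt fuel n; (r, d :: p)

def stepB (st : PySem.Dict Int Int × Int) (p : Int × Int) : PySem.Dict Int Int × Int :=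
  let (r, path) := chaseB st.1 (st.1.size + 1) p.1
  let nxt1 := path.foldl (fun m q => m.insert q r) st.1   -- path compression
  if r ≤ p.2 then (nxt1.insert r (r + 1), st.2 + 1) else (nxt1, st.2)

def countMeetings_alt (firstDay : List Int) (lastDay : List Int) : Int :=
  ((PySem.List.sorted (firstDay.zip lastDay) (fun x => x.2) false).foldl
    stepB (PySem.Dict.empty, 0)).2

-- ===== PRECONDITION & SPEC =====
def Spec_countMeetings (firstDay : List Int) (lastDay : List Int) (out : Int) : Prop := out = countMeetings_alt firstDay lastDay
instance (firstDay : List Int) (lastDay : List Int) (out : Int) : Decidable (Spec_countMeetings firstDay lastDay out) := by unfold Spec_countMeetings; infer_instance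

-- ===== CLAIM (what is proved, stated in full; the proofs are below) =====
def Claim_equal_countMeetings : Prop := ∀ (firstDay : List Int) (lastDay : List Int), Dom_countMeetings firstDay lastDay → Spec_countMeetings firstDay lastDay (countMeetings firstDay lastDay)

-- ===== LEMMAS AND PROOFS =====

-- Simulation invariant between A's set of taken days and B's pointer dictionary:
-- same underlying set of days, and every pointer d ↦ v jumps over taken days only.
def InvCM (av : PySem.Set Int) (nxt : PySem.Dict Int Int) : Prop :=
  nxt.keys.Nodup ∧
  (∀ d : Int, d ∈ av ↔ nxt.contains d = true) ∧
  (∀ d v : Int, nxt.get? d = some v → d < v ∧ ∀ e : Int, d ≤ e → e < v → e ∈ av)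

-- A's inner scan finds exactly the least free day ≥ start (if it fits in the interval).
theorem innerA_of_leastFree (av : PySem.Set Int) (c r : Int) (hnot : r ∉ av) :
    ∀ (steps : Nat) (a : Int), a ≤ r → (∀ e : Int, a ≤ e → e < r → e ∈ av) →
    innerA a steps av c =
      if r < a + (steps : Int) then (PySem.Set.add av r, c + 1) else (av, c) := by
  intro steps
  induction steps with
  | zero =>
    intro a har _
    rw [if_neg (by omega)]
    rfl
  | succ k ih =>
    intro a har hint
    by_cases hr : a = r
    · subst hr
      simp only [innerA, if_neg hnot]
      rw [if_pos (by push_cast; omega)]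
    · have hm : a ∈ av := hint a le_rfl (by omega)
      simp only [innerA, if_pos hm]
      rw [ih (a + 1) (by omega) (fun e he1 he2 => hint e (by omega) he2)]
      by_cases hc : r < a + ((k : Int) + 1)
      · rw [if_pos (by omega), if_pos (by push_cast; omega)]
      · rw [if_neg (by omega), if_neg (by push_cast; omega)]

-- strictly fewer keys ≥ n than keys ≥ d when d is itself a key and d < n
theorem filter_ge_lt (l : List Int) (d n : Int) (hdn : d < n) (hd : d ∈ l) :
    (l.filter (fun k => decide (n ≤ k))).length < (l.filter (fun k => decide (d ≤ k))).length := by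
  have h1 : l.filter (fun k => decide (n ≤ k)) =
      (l.filter (fun k => decide (d ≤ k))).filter (fun k => decide (n ≤ k)) := by
    rw [List.filter_filter]
    apply List.filter_congr
    intro x _
    by_cases hx : n ≤ x
    · simp [hx]; omega
    · simp [hx]
  rw [h1]
  apply List.length_filter_lt_length_iff_exists.mpr
  exact ⟨d, List.mem_filter.mpr ⟨hd, by simp⟩, by simp; omega⟩

theorem chaseB_spec (av : PySem.Set Int) (nxt : PySem.Dict Int Int) (hInv : InvCM av nxt) :
    ∀ (fuel : Nat) (d r : Int) (path : List Int),
      (nxt.keys.filter (fun k => decide (d ≤ k))).length < fuel →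
      chaseB nxt fuel d = (r, path) →
      nxt.contains r = false ∧ d ≤ r ∧
      (∀ e : Int, d ≤ e → e < r → e ∈ av) ∧
      (∀ p ∈ path, nxt.contains p = true ∧ d ≤ p ∧ p < r) := by
  intro fuel
  induction fuel with
  | zero => intro d r path hlen; omega
  | succ fuel ih =>
    intro d r path hlen hch
    simp only [chaseB] at hch
    cases hget : nxt.get? d with
    | none =>
      rw [hget] at hch
      obtain ⟨rfl, rfl⟩ := Prod.mk.injEq .. ▸ hch
      refine ⟨(PySem.Dict.get?_eq_none_iff_contains nxt d).mp hget, le_rfl, ?_, ?_⟩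
      · intro e h1 h2; omega
      · intro p hp; simp at hp
    | some n =>
      rw [hget] at hch
      simp only at hch
      obtain ⟨hlt, hint⟩ := hInv.2.2 d n hget
      have hcd : nxt.contains d = true := by
        rw [PySem.Dict.contains_eq_isSome_get?, hget]; rfl
      have hdk : d ∈ nxt.keys := (PySem.Dict.contains_iff_mem_keys nxt d).mp hcd
      cases hc : chaseB nxt fuel n with
      | mk r' p' =>
        rw [hc] at hch
        obtain ⟨rfl, rfl⟩ := Prod.mk.injEq .. ▸ hch
        have hb : (nxt.keys.filter (fun k => decide (n ≤ k))).length <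
            (nxt.keys.filter (fun k => decide (d ≤ k))).length :=
          filter_ge_lt nxt.keys d n hlt hdk
        obtain ⟨h1, h2, h3, h4⟩ := ih n r' p' (by omega) hc
        refine ⟨h1, by omega, ?_, ?_⟩
        · intro e he1 he2
          by_cases hen : e < n
          · exact hint e he1 hen
          · exact h3 e (by omega) he2
        · intro p hp
          rcases List.mem_cons.mp hp with rfl | hp'
          · exact ⟨hcd, le_rfl, by omega⟩
          · obtain ⟨g1, g2, g3⟩ := h4 p hp'
            exact ⟨g1, by omega, g3⟩

theorem compress_spec (av : PySem.Set Int) (r : Int) :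
    ∀ (path : List Int) (nxt : PySem.Dict Int Int), InvCM av nxt →
      (∀ p ∈ path, nxt.contains p = true ∧ p < r ∧ ∀ e : Int, p ≤ e → e < r → e ∈ av) →
      InvCM av (path.foldl (fun m q => m.insert q r) nxt) ∧
      (∀ k : Int, (path.foldl (fun m q => m.insert q r) nxt).contains k = nxt.contains k) := by
  intro path
  induction path with
  | nil => intro nxt hInv _; exact ⟨hInv, fun _ => rfl⟩
  | cons q path ih =>
    intro nxt hInv hps
    obtain ⟨hq, hqr, hqint⟩ := hps q (List.mem_cons_self ..)
    obtain ⟨hnd, hmem, hget⟩ := hInv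
    have hcontains : ∀ k : Int, (nxt.insert q r).contains k = nxt.contains k := by
      intro k
      rw [PySem.Dict.contains_insert]
      by_cases hk : k = q
      · subst hk; simp [hq]
      · simp [hk]
    have hInv' : InvCM av (nxt.insert q r) := by
      refine ⟨PySem.Dict.nodup_keys_insert nxt q r hnd, ?_, ?_⟩
      · intro x; rw [hcontains x]; exact hmem x
      · intro d v hdv
        rw [PySem.Dict.get?_insert] at hdv
        by_cases hd : d = q
        · rw [if_pos hd] at hdv
          injection hdv with hv
          subst hd; subst hv
          exact ⟨hqr, hqint⟩
        · rw [if_neg hd] at hdv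
          exact hget d v hdv
    have hps' : ∀ p ∈ path, (nxt.insert q r).contains p = true ∧ p < r ∧
        ∀ e : Int, p ≤ e → e < r → e ∈ av := by
      intro p hp
      obtain ⟨h1, h2, h3⟩ := hps p (List.mem_cons_of_mem _ hp)
      exact ⟨by rw [hcontains p]; exact h1, h2, h3⟩
    obtain ⟨hi, hcs⟩ := ih (nxt.insert q r) hInv' hps'
    simp only [List.foldl_cons]
    exact ⟨hi, fun k => by rw [hcs k, hcontains k]⟩

theorem assign_preserves (av : PySem.Set Int) (nxt : PySem.Dict Int Int) (r : Int)
    (hInv : InvCM av nxt) (hfree : nxt.contains r = false) :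
    InvCM (PySem.Set.add av r) (nxt.insert r (r + 1)) := by
  obtain ⟨hnd, hmem, hget⟩ := hInv
  refine ⟨PySem.Dict.nodup_keys_insert nxt r (r + 1) hnd, ?_, ?_⟩
  · intro x
    rw [PySem.Set.mem_add av r x, PySem.Dict.contains_insert]
    by_cases hx : x = r
    · subst hx; simp
    · simp [hx, hmem x]
  · intro d v hdv
    rw [PySem.Dict.get?_insert] at hdv
    by_cases hd : d = r
    · rw [if_pos hd] at hdv
      injection hdv with hv
      refine ⟨by omega, ?_⟩
      intro e h1 h2
      have he : e = r := by omega
      exact he ▸ (PySem.Set.mem_add av r r).mpr (Or.inr rfl)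
    · rw [if_neg hd] at hdv
      obtain ⟨g1, g2⟩ := hget d v hdv
      exact ⟨g1, fun e h1 h2 => (PySem.Set.mem_add av r e).mpr (Or.inl (g2 e h1 h2))⟩

theorem loop_sim (sched : List (Int × Int)) :
    ∀ (av : PySem.Set Int) (nxt : PySem.Dict Int Int) (c : Int), InvCM av nxt →
      (sched.foldl (fun st p => innerA p.1 (p.2 + 1 - p.1).toNat st.1 st.2) (av, c)).2 =
      (sched.foldl stepB (nxt, c)).2 := by
  induction sched with
  | nil => intro av nxt c _; rfl
  | cons p sched ih =>
    intro av nxt c hInv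
    obtain ⟨s, e⟩ := p
    cases hc : chaseB nxt (nxt.size + 1) s with
    | mk r path =>
      have hfuel : (nxt.keys.filter (fun k => decide (s ≤ k))).length < nxt.size + 1 := by
        have h1 := List.length_filter_le (fun k => decide (s ≤ k)) nxt.keys
        have h2 : nxt.size = nxt.keys.length := by
          simp [PySem.Dict.size, PySem.Dict.keys]
        omega
      obtain ⟨hfree, hsr, hintv, hpath⟩ := chaseB_spec av nxt hInv _ s r path hfuel hc
      have hps : ∀ q ∈ path, nxt.contains q = true ∧ q < r ∧
          ∀ e' : Int, q ≤ e' → e' < r → e' ∈ av := by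
        intro q hq
        obtain ⟨h1, h2, h3⟩ := hpath q hq
        exact ⟨h1, h3, fun e' he1 he2 => hintv e' (by omega) he2⟩
      obtain ⟨hInv1, hcont1⟩ := compress_spec av r path nxt hInv hps
      have hrnot : r ∉ av := by
        intro h
        have h2 := (hInv.2.1 r).mp h
        rw [hfree] at h2
        cases h2
      have hA : innerA s (e + 1 - s).toNat av c =
          if r ≤ e then (PySem.Set.add av r, c + 1) else (av, c) := by
        rw [innerA_of_leastFree av c r hrnot (e + 1 - s).toNat s hsr hintv]
        by_cases hre : r ≤ e
        · rw [if_pos (by omega), if_pos hre]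
        · rw [if_neg (by omega), if_neg hre]
      have hB : stepB (nxt, c) (s, e) =
          if r ≤ e then ((path.foldl (fun m q => m.insert q r) nxt).insert r (r + 1), c + 1)
          else (path.foldl (fun m q => m.insert q r) nxt, c) := by
        simp only [stepB, hc]
      simp only [List.foldl_cons]
      rw [hB]
      show (sched.foldl _ (innerA s (e + 1 - s).toNat av c)).2 = _
      rw [hA]
      by_cases hre : r ≤ e
      · rw [if_pos hre, if_pos hre]
        exact ih _ _ _ (assign_preserves av _ r hInv1 (by rw [hcont1 r]; exact hfree))
      · rw [if_neg hre, if_neg hre]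
        exact ih _ _ _ hInv1

-- ===== VERDICT (by name: the statement is the Claim_ definition above) =====
theorem countMeetings_spec : Claim_equal_countMeetings := by
  intro firstDay lastDay _
  unfold Spec_countMeetings countMeetings countMeetings_alt
  exact loop_sim _ PySem.Set.empty PySem.Dict.empty 0 (by
    refine ⟨PySem.Dict.nodup_keys_empty, ?_, ?_⟩ <;>
      simp [PySem.Set.empty, PySem.Dict.contains_empty, PySem.Dict.get?_empty])
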